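-- pv_equiv track=rewrite | github.com/cchristodoulaki/Pytheas | src/pytheas_utilities.py | generate_symbol_summary
-- ===== SOURCE A (Python) =====
-- def generate_symbol_summary(attribute_symbols):
--     #initialize symbol list
--     attribute_symbols = [s for s in attribute_symbols if len(s) > 0]
--     if len(attribute_symbols) > 0:
--         summary_symbols = list(attribute_symbols[0])
--         for symbol in list(attribute_symbols[0]):
--             for symbolset in attribute_symbols:
--                 if symbol not in symbolset:
--                     summary_symbols.remove(symbol)
--                     break
--         return summary_symbols
--     return []
-- ===== SOURCE B (Python) =====
-- def generate_symbol_summary(attribute_symbols):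
--     attribute_symbols = [s for s in attribute_symbols if len(s) > 0]
--     if not attribute_symbols:
--         return []
--     common = set(attribute_symbols[0]).intersection(*attribute_symbols[1:])
--     return [c for c in attribute_symbols[0] if c in common]
-- ===== Notes on version B (the rewrite author's own statement) =====
-- stated objective: simpler
-- what changed: B folds all symbol strings into one common intersection set and then filters the first string in a single pass, instead of A's per-character nested scan over all sets with in-place list.remove deletions.
import Mathlib
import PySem

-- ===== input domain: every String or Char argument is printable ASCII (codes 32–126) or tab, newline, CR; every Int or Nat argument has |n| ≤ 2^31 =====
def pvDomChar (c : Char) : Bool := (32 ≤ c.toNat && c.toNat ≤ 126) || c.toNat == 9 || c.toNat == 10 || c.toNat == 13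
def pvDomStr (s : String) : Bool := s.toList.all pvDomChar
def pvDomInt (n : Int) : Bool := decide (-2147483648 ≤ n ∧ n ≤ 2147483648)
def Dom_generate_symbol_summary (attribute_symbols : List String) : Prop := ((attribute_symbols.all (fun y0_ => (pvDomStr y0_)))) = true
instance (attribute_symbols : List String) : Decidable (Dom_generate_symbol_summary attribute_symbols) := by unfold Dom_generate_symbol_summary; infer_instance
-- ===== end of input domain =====

-- B replaces A's per-character nested scan with list.remove deletions by one folded
-- common intersection set plus a single filtering pass over the first string (objective: simpler).


-- ===== PORT A =====
-- summary_symbols.remove(symbol): first-occurrence removal; in A the symbol is always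
-- present when removed, so the ValueError branch (none) never fires and getD is exact.
def gssRemove (xs : List Char) (c : Char) : List Char := (PySem.List.remove? xs c).getD xs

-- the inner 'for symbolset in attribute_symbols: if symbol not in symbolset: remove; break'.
-- 'symbol' is a one-character string (an element of list(str)), so Python's substring test
-- 'symbol not in symbolset' is exactly char membership in symbolset's characters.
def gssInner (summary : List Char) (symbol : Char) : List String → List Char
  | [] => summary
  | sset :: rest =>
      if ¬ (sset.toList.contains symbol) then gssRemove summary symbol
      else gssInner summary symbol rest

def generate_symbol_summary (attribute_symbols : List String) : List String :=
  let attribute_symbols := attribute_symbols.filter (fun s => decide (0 < s.toList.length))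
  if attribute_symbols.length > 0 then
    let first := (attribute_symbols.head?.getD "").toList   -- list(attribute_symbols[0])
    let summary := first.foldl (fun st c => gssInner st c attribute_symbols) first
    summary.map (fun c => String.mk [c])   -- the summary is a list of one-char strings
  else []

-- ===== PORT B =====
-- set(first).intersection(*rest) as the fold of pairwise intersections.
def gssCommon (first : List Char) (rest : List String) : PySem.Set Char :=
  rest.foldl (fun acc s => PySem.Set.inter acc s.toList) (PySem.Set.ofList first)

def generate_symbol_summary_alt (attribute_symbols : List String) : List String :=
  let attribute_symbols := attribute_symbols.filter (fun s => decide (0 < s.toList.length))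
  match attribute_symbols with
  | [] => []
  | first :: rest =>
      let common := gssCommon first.toList rest
      (first.toList.filter (fun c => common.contains c)).map (fun c => String.mk [c])

-- ===== PRECONDITION & SPEC =====
def Spec_generate_symbol_summary (attribute_symbols : List String) (out : List String) : Prop := out = generate_symbol_summary_alt attribute_symbols
instance (attribute_symbols : List String) (out : List String) : Decidable (Spec_generate_symbol_summary attribute_symbols out) := by unfold Spec_generate_symbol_summary; infer_instance

-- ===== CLAIM (what is proved, stated in full; the proofs are below) =====
def Claim_equal_generate_symbol_summary : Prop := ∀ (attribute_symbols : List String), Dom_generate_symbol_summary attribute_symbols → Spec_generate_symbol_summary attribute_symbols (generate_symbol_summary attribute_symbols)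

-- ===== LEMMAS AND PROOFS =====

-- the inner loop either leaves the summary alone (symbol in every set) or removes its first occurrence
theorem gssInner_eq (summary : List Char) (c : Char) (sets : List String) :
    gssInner summary c sets =
      if sets.all (fun s => s.toList.contains c) then summary else gssRemove summary c := by
  induction sets with
  | nil => simp [gssInner]
  | cons s rest ih =>
      by_cases h : s.toList.contains c
      · have hm : c ∈ s.toList := by simpa using h
        simp [gssInner, ih, hm]
      · have hc : c ∉ s.toList := by simpa [List.contains_iff_mem] using h
        simp [gssInner, hc]

theorem gssRemove_clean (pre post : List Char) (c : Char) (h : c ∉ pre) :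
    gssRemove (pre ++ c :: post) c = pre ++ post := by
  induction pre with
  | nil => simp [gssRemove]
  | cons x xs ih =>
      have hx : x ≠ c := fun e => h (by simp [e])
      have hxs : c ∉ xs := fun m => h (by simp [m])
      simp only [gssRemove, List.cons_append, PySem.List.remove?_cons_of_ne _ hx]
      cases hr : PySem.List.remove? (xs ++ c :: post) c with
      | none => simp [PySem.List.remove?_eq_none_iff] at hr
      | some r =>
          have := ih hxs
          simp only [gssRemove, hr, Option.getD_some] at this
          simp [this]

-- the outer loop over a prefix-clean state filters out exactly the failing characters
theorem gssFoldl_filter (p : Char → Bool) :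
    ∀ (L pre : List Char), (∀ x ∈ pre, p x) →
      L.foldl (fun st c => if p c then st else gssRemove st c) (pre ++ L) = pre ++ L.filter p := by
  intro L
  induction L with
  | nil => intro pre _; simp
  | cons c L' ih =>
      intro pre hpre
      by_cases hc : p c
      · have h1 : pre ++ c :: L' = (pre ++ [c]) ++ L' := by simp
        have h2 : ∀ x ∈ pre ++ [c], p x := by
          intro x hx; rcases List.mem_append.1 hx with h | h
          · exact hpre x h
          · simp at h; subst h; exact hc
        simp only [List.foldl_cons, hc, if_pos, h1, ih (pre ++ [c]) h2]
        simp [hc]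
      · have hnot : c ∉ pre := fun m => hc (hpre c m)
        simp only [List.foldl_cons, hc, if_neg, Bool.false_eq_true, not_false_iff,
          gssRemove_clean pre L' c hnot, ih pre hpre]
        simp [hc]

theorem gssFoldlInter_mem (rest : List String) :
    ∀ (acc : PySem.Set Char) (c : Char),
      c ∈ rest.foldl (fun a s => PySem.Set.inter a s.toList) acc ↔
        c ∈ acc ∧ ∀ s ∈ rest, c ∈ s.toList := by
  induction rest with
  | nil => intro acc c; simp
  | cons s rest ih =>
      intro acc c
      simp only [List.foldl_cons, ih, PySem.Set.mem_inter, List.mem_cons]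
      constructor
      · rintro ⟨⟨h1, h2⟩, h3⟩
        exact ⟨h1, fun t ht => ht.elim (fun e => e ▸ h2) (h3 t)⟩
      · rintro ⟨h1, h2⟩
        exact ⟨⟨h1, h2 s (Or.inl rfl)⟩, fun t ht => h2 t (Or.inr ht)⟩

theorem gssCommon_contains (rest : List String) (first : List Char) (c : Char) :
    (gssCommon first rest).contains c = true ↔
      c ∈ first ∧ ∀ s ∈ rest, c ∈ s.toList := by
  unfold gssCommon
  rw [PySem.Set.contains_iff, gssFoldlInter_mem, PySem.Set.mem_ofList]

-- ===== VERDICT (by name: the statement is the Claim_ definition above) =====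
theorem generate_symbol_summary_spec : Claim_equal_generate_symbol_summary := by
  intro xs _
  unfold Spec_generate_symbol_summary generate_symbol_summary generate_symbol_summary_alt
  cases hF : xs.filter (fun s => decide (0 < s.toList.length)) with
  | nil => simp
  | cons first rest =>
      simp only [List.length_cons, gt_iff_lt, Nat.succ_pos, if_true, List.head?_cons,
        Option.getD_some]
      have hstep : (first.toList.foldl (fun st c => gssInner st c (first :: rest)) first.toList)
          = first.toList.filter (fun c => (first :: rest).all (fun s => s.toList.contains c)) := by
        have h0 := gssFoldl_filter (fun c => (first :: rest).all (fun s => s.toList.contains c))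
          first.toList [] (by simp)
        simp only [List.nil_append] at h0
        rw [← h0]
        simp only [gssInner_eq]
      rw [hstep]
      congr 1
      apply List.filter_congr
      intro c hc
      apply Bool.coe_iff_coe.mp
      rw [gssCommon_contains]
      simp [List.all_cons, hc]
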